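-- pv_equiv track=rewrite | github.com/syntra-vindevoy/python-1-2024 | stone.py | get_solution_version1
-- ===== SOURCE A (Python) =====
-- def get_solution_version1(n):
--     """
--     Probeert alle combinaties tot de som bereikt is.
--     Alle items voorbij de som worden genegeerd.
--     """
--     for l in [27, 0]:
--         for k in [-9, 0, 9]:
--             for j in [-3, 0, 3]:
--                 for i in [-1, 0, 1]:
--                     if l + k + j + i == n:
--                         return l, k, j, i
--     return None
-- ===== SOURCE B (Python) =====
-- def get_solution_version1(n):
--     if -13 <= n <= 13:
--         l, r = 0, n
--     elif 14 <= n <= 40: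
--         l, r = 27, n - 27
--     else:
--         return None
--     digits = []
--     for _ in range(3):
--         d = r % 3
--         if d == 2:
--             d = -1
--         digits.append(d)
--         r = (r - d) // 3
--     i, j, k = digits
--     return (l, 9 * k, 3 * j, i)
-- ===== Notes on version B (the rewrite author's own statement) =====
-- stated objective: simpler
-- what changed: Replaced the nested brute-force search over all weight combinations with a direct range test selecting the large weight and arithmetic balanced-ternary digit extraction (remainder mod three, a remainder of two mapped to a negative digit with carry by floor division) for the three small weights.
import Mathlib
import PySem

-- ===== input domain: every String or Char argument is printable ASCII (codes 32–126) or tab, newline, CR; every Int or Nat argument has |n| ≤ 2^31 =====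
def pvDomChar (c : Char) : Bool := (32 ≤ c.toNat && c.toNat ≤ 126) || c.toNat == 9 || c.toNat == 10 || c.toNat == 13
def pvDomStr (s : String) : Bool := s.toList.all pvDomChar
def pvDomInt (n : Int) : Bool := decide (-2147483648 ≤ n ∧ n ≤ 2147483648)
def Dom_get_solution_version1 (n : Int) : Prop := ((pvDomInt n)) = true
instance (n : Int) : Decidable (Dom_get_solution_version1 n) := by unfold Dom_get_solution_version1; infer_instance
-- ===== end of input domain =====

-- ===== PORT A =====
-- B replaces A's nested brute-force search with direct range tests and balanced-ternary digit extraction (simpler/closed-form).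
def get_solution_version1 (n : Int) : Option (Int × Int × Int × Int) :=
  ([27, 0] : List Int).findSome? fun l =>
    ([-9, 0, 9] : List Int).findSome? fun k =>
      ([-3, 0, 3] : List Int).findSome? fun j =>
        ([-1, 0, 1] : List Int).findSome? fun i =>
          if l + k + j + i = n then some (l, k, j, i) else none

-- ===== PORT B =====
-- the 3-iteration digit loop of Source B: each step takes r % 3 (Python mod), maps 2 to -1, floor-divides
def pvDigitsB : Nat → Int → List Int
  | 0, _ => []
  | m + 1, r =>
    let d0 := PySem.Int.mod r 3
    let d := if d0 = 2 then -1 else d0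
    d :: pvDigitsB m (PySem.Int.floordiv (r - d) 3)

def get_solution_version1_alt (n : Int) : Option (Int × Int × Int × Int) :=
  if -13 ≤ n ∧ n ≤ 13 then
    match pvDigitsB 3 n with
    | [i, j, k] => some (0, 9 * k, 3 * j, i)
    | _ => none
  else if 14 ≤ n ∧ n ≤ 40 then
    match pvDigitsB 3 (n - 27) with
    | [i, j, k] => some (27, 9 * k, 3 * j, i)
    | _ => none
  else
    none

-- ===== PRECONDITION & SPEC =====
def Spec_get_solution_version1 (n : Int) (out : Option (Int × Int × Int × Int)) : Prop := out = get_solution_version1_alt n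
instance (n : Int) (out : Option (Int × Int × Int × Int)) : Decidable (Spec_get_solution_version1 n out) := by unfold Spec_get_solution_version1; infer_instance

-- ===== CLAIM =====
def Claim_equal_get_solution_version1 : Prop := ∀ (n : Int), Dom_get_solution_version1 n → Spec_get_solution_version1 n (get_solution_version1 n)

-- ===== LEMMAS AND PROOFS =====
theorem pv_outside_none (n : Int) (h : ¬ (-13 ≤ n ∧ n ≤ 40)) :
    get_solution_version1 n = none ∧ get_solution_version1_alt n = none := by
  constructor
  · simp only [get_solution_version1, List.findSome?_eq_none_iff, List.mem_cons,
      List.not_mem_nil, or_false]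
    rintro a ha b hb c hc d hd
    rcases ha with rfl | rfl <;> rcases hb with rfl | rfl | rfl <;>
      rcases hc with rfl | rfl | rfl <;> rcases hd with rfl | rfl | rfl <;>
      exact if_neg (by omega)
  · unfold get_solution_version1_alt
    rw [if_neg (by omega), if_neg (by omega)]

-- ===== VERDICT =====
theorem get_solution_version1_spec : Claim_equal_get_solution_version1 := by
  intro n _
  unfold Spec_get_solution_version1
  by_cases h : -13 ≤ n ∧ n ≤ 40
  · obtain ⟨h1, h2⟩ := h
    interval_cases n <;> decide
  · obtain ⟨ha, hb⟩ := pv_outside_none n h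
    rw [ha, hb]
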